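-- pv_equiv track=rewrite | github.com/dbsrlskfdk/boj-algorithm | 프로그래머스/2/250136. ［PCCP 기출문제］ 2번 ／ 석유 시추/［PCCP 기출문제］ 2번 ／ 석유 시추.py | solution
-- ===== SOURCE A (Python) =====
-- from collections import deque
--
-- def solution(land):
--     num_rows = len(land)
--     num_cols = len(land[0])
--
--     col_cnt = [0 for _ in range(num_cols)]
--     visited = set()
--     dy = [-1, 1, 0, 0]
--     dx = [0, 0, -1, 1]
--
--     for i in range(num_rows):
--         for j in range(num_cols):
--             if (i, j) not in visited and land[i][j]:
--                     que = deque([(i, j)])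
--                     visited.add((i, j))
--                     col_has = set([j])
--                     cnt = 1
--                     while que:
--                         y, x = que.popleft()
--
--                         for h in range(4):
--                             ny = y + dy[h]
--                             nx = x + dx[h]
--
--                             if 0 <= ny < num_rows and 0 <= nx < num_cols:
--                                 if (ny, nx) not in visited and land[ny][nx]:
--                                     cnt += 1
--                                     col_has.add(nx)
--
--                                     que.append((ny, nx))
--                                     visited.add((ny, nx))
--
--                     for c in col_has:
--                         col_cnt[c] += cnt
--
--     max_cnt = max(col_cnt)
--
--     answer = max_cnt
--     return answer
-- ===== SOURCE B (Python) =====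
-- def merge(label, a, b):
--     la, lb = label[a], label[b]
--     if la == lb:
--         return label
--     return [la if v == lb else v for v in label]
--
-- def solution(land):
--     num_rows = len(land)
--     num_cols = len(land[0])
--     label = list(range(num_rows * num_cols))
--     for r in range(num_rows):
--         for c in range(num_cols):
--             if land[r][c]:
--                 if c + 1 < num_cols and land[r][c + 1]:
--                     label = merge(label, r * num_cols + c, r * num_cols + c + 1)
--                 if r + 1 < num_rows and land[r + 1][c]:
--                     label = merge(label, r * num_cols + c, (r + 1) * num_cols + c)
--     col_cnt = []
--     for c in range(num_cols):
--         col_labels = {label[r * num_cols + c] for r in range(num_rows) if land[r][c]}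
--         total = 0
--         for r in range(num_rows):
--             for cc in range(num_cols):
--                 if land[r][cc] and label[r * num_cols + cc] in col_labels:
--                     total += 1
--         col_cnt.append(total)
--     return max(col_cnt)
-- ===== Notes on version B (the rewrite author's own statement) =====
-- stated objective: alternative
-- what changed: Replaces A's per-component BFS flood fill (queue + visited set + per-component column set) by a union-find over cell ids built with union-by-relabel on right/down neighbour edges, followed by a direct per-column counting pass over labels.
import Mathlib
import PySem

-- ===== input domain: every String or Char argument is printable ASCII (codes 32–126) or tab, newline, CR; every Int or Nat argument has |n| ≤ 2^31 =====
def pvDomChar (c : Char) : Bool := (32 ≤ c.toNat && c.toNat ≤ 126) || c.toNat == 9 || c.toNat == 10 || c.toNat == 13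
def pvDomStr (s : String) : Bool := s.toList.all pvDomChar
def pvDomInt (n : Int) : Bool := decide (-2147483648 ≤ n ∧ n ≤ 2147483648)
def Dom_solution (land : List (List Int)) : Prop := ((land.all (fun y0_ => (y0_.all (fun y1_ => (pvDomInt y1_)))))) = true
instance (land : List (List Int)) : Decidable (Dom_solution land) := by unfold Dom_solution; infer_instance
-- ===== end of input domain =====

-- B replaces A's per-component BFS flood fill by a union-by-relabel (simple union-find) pass over
-- right/down neighbour edges plus a direct per-column counting pass: alternative algorithm, same values.


-- ===== PORT A =====
-- land[y][x]; read only at indices Pre_ keeps in range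
def pvLandAt (land : List (List Int)) (y x : Int) : Int :=
  PySem.List.pyGetD (PySem.List.pyGetD land y []) x 0

def pvDy : List Int := [-1, 1, 0, 0]
def pvDx : List Int := [0, 0, -1, 1]

-- BFS loop state: (que, visited, col_has, cnt)
abbrev pvSt : Type := List (Int × Int) × PySem.Set (Int × Int) × PySem.Set Int × Int

-- all in-bounds cells and the count of not-yet-visited ones (termination measure of the BFS loop)
def pvAllCells (numRows numCols : Int) : List (Int × Int) :=
  (PySem.List.pyRange 0 numRows 1).flatMap (fun r => (PySem.List.pyRange 0 numCols 1).map (fun c => (r, c)))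

def pvUnseen (numRows numCols : Int) (vis : PySem.Set (Int × Int)) : Nat :=
  ((pvAllCells numRows numCols).filter (fun p => ¬ p ∈ vis)).length

-- loop body of "for h in range(4)" of A, for the popped cell (y, x)
def pvNbr (y x : Int) (h : Int) : Int × Int :=
  (y + PySem.List.pyGetD pvDy h 0, x + PySem.List.pyGetD pvDx h 0)

-- ny := y + dy[h]; nx := x + dx[h]
def pvNbrsStep (land : List (List Int)) (numRows numCols : Int) (y x : Int) (st : pvSt) (h : Int) : pvSt :=
  if 0 ≤ (pvNbr y x h).1 ∧ (pvNbr y x h).1 < numRows ∧ 0 ≤ (pvNbr y x h).2 ∧ (pvNbr y x h).2 < numCols then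
    if pvNbr y x h ∉ st.2.1 ∧ pvLandAt land (pvNbr y x h).1 (pvNbr y x h).2 ≠ 0 then
      (st.1 ++ [pvNbr y x h], PySem.Set.add st.2.1 (pvNbr y x h), PySem.Set.add st.2.2.1 (pvNbr y x h).2, st.2.2.2 + 1)
    else st
  else st

def pvNbrs (land : List (List Int)) (numRows numCols : Int) (y x : Int) (st : pvSt) : pvSt :=
  (PySem.List.pyRange 0 4 1).foldl (pvNbrsStep land numRows numCols y x) st

theorem pvUnseen_append (numRows numCols : Int) (vis : PySem.Set (Int × Int)) (p : Int × Int)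
    (hb : p ∈ pvAllCells numRows numCols) (hnv : p ∉ vis) :
    pvUnseen numRows numCols (vis ++ [p]) + 1 ≤ pvUnseen numRows numCols vis := by
  unfold pvUnseen
  have h1 : ((pvAllCells numRows numCols).filter (fun q => ¬ q ∈ vis ++ [p]))
      = ((pvAllCells numRows numCols).filter (fun q => ¬ q ∈ vis)).filter (fun q => q ≠ p) := by
    rw [List.filter_filter]
    apply List.filter_congr
    intro x _
    simp [List.mem_append, Bool.and_comm]
  rw [h1]
  have hp : p ∈ (pvAllCells numRows numCols).filter (fun q => ¬ q ∈ vis) := by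
    simp [List.mem_filter, hb, hnv]
  have hlt : (((pvAllCells numRows numCols).filter (fun q => ¬ q ∈ vis)).filter (fun q => q ≠ p)).length
      < ((pvAllCells numRows numCols).filter (fun q => ¬ q ∈ vis)).length := by
    apply List.length_filter_lt_length_iff_exists.mpr
    exact ⟨p, hp, by simp⟩
  omega

theorem pvNbrsStep_measure (land : List (List Int)) (numRows numCols : Int) (y x : Int)
    (st : pvSt) (h : Int) :
    (pvNbrsStep land numRows numCols y x st h).1.length
      + 2 * pvUnseen numRows numCols (pvNbrsStep land numRows numCols y x st h).2.1
      ≤ st.1.length + 2 * pvUnseen numRows numCols st.2.1 := by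
  unfold pvNbrsStep
  split_ifs with h1 h2
  · obtain ⟨hmem, _⟩ := h2
    have hb : pvNbr y x h ∈ pvAllCells numRows numCols := by
      simp only [pvAllCells, List.mem_flatMap, List.mem_map, PySem.List.mem_pyRange_one]
      exact ⟨_, ⟨h1.1, h1.2.1⟩, _, ⟨h1.2.2.1, h1.2.2.2⟩, rfl⟩
    have := pvUnseen_append numRows numCols st.2.1 _ hb hmem
    rw [PySem.Set.add_of_not_mem hmem]
    simp only [List.length_append, List.length_cons, List.length_nil]
    omega
  · exact le_refl _
  · exact le_refl _

theorem pvNbrs_measure (land : List (List Int)) (numRows numCols : Int) (y x : Int) (st : pvSt) :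
    (pvNbrs land numRows numCols y x st).1.length
      + 2 * pvUnseen numRows numCols (pvNbrs land numRows numCols y x st).2.1
      ≤ st.1.length + 2 * pvUnseen numRows numCols st.2.1 := by
  unfold pvNbrs
  generalize PySem.List.pyRange 0 4 1 = hs
  induction hs generalizing st with
  | nil => exact le_refl _
  | cons h t ih =>
      simp only [List.foldl_cons]
      exact le_trans (ih _) (pvNbrsStep_measure land numRows numCols y x st h)

-- the "while que:" loop of A; returns (visited, col_has, cnt)
def pvBfs (land : List (List Int)) (numRows numCols : Int)
    (que : List (Int × Int)) (vis : PySem.Set (Int × Int)) (colh : PySem.Set Int) (cnt : Int) :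
    PySem.Set (Int × Int) × PySem.Set Int × Int :=
  match que with
  | [] => (vis, colh, cnt)
  | (y, x) :: rest =>
      let st := pvNbrs land numRows numCols y x (rest, vis, colh, cnt)
      pvBfs land numRows numCols st.1 st.2.1 st.2.2.1 st.2.2.2
termination_by que.length + 2 * pvUnseen numRows numCols vis
decreasing_by
  have h := pvNbrs_measure land numRows numCols y x (rest, vis, colh, cnt)
  dsimp only at h
  simp only [List.length_cons]
  omega

def solution (land : List (List Int)) : Int :=
  let numRows : Int := PySem.List.len land
  let numCols : Int := PySem.List.len (PySem.List.pyGetD land 0 [])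
  let st :=
    (PySem.List.pyRange 0 numRows 1).foldl (fun st i =>
      (PySem.List.pyRange 0 numCols 1).foldl (fun st j =>
        if (i, j) ∉ st.2 ∧ pvLandAt land i j ≠ 0 then
          let res := pvBfs land numRows numCols [(i, j)] (PySem.Set.add st.2 (i, j))
                       (PySem.Set.add PySem.Set.empty j) 1
          -- "for c in col_has: col_cnt[c] += cnt": set iteration, order-independent (distinct indices)
          (res.2.1.foldl (fun cc c => PySem.List.pySetD cc c (PySem.List.pyGetD cc c 0 + res.2.2)) st.1,
           res.1)
        else st) st)
      ((PySem.List.pyRange 0 numCols 1).map (fun _ => (0 : Int)), PySem.Set.empty)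
  -- max(col_cnt): list nonempty under Pre_, total form with default 0
  (PySem.List.max? st.1 (fun v => v)).getD 0

-- ===== PORT B =====
def pvMerge (label : List Int) (a b : Int) : List Int :=
  let la := PySem.List.pyGetD label a 0
  let lb := PySem.List.pyGetD label b 0
  if la = lb then label
  else label.map (fun v => if v = lb then la else v)

-- label array after the row-major union pass of B
def pvAltLabel (land : List (List Int)) : List Int :=
  let numRows : Int := PySem.List.len land
  let numCols : Int := PySem.List.len (PySem.List.pyGetD land 0 [])
  (PySem.List.pyRange 0 numRows 1).foldl (fun lab r =>
    (PySem.List.pyRange 0 numCols 1).foldl (fun lab c =>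
      if pvLandAt land r c ≠ 0 then
        let lab1 := if c + 1 < numCols ∧ pvLandAt land r (c + 1) ≠ 0 then
            pvMerge lab (r * numCols + c) (r * numCols + c + 1) else lab
        if r + 1 < numRows ∧ pvLandAt land (r + 1) c ≠ 0 then
            pvMerge lab1 (r * numCols + c) ((r + 1) * numCols + c) else lab1
      else lab) lab)
    (PySem.List.pyRange 0 (numRows * numCols) 1)

-- per-column counting pass of B
def pvAltColCnt (land : List (List Int)) (label : List Int) : List Int :=
  let numRows : Int := PySem.List.len land
  let numCols : Int := PySem.List.len (PySem.List.pyGetD land 0 [])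
  (PySem.List.pyRange 0 numCols 1).foldl (fun acc c =>
    let colLabels : PySem.Set Int :=
      (PySem.List.pyRange 0 numRows 1).foldl (fun s r =>
        if pvLandAt land r c ≠ 0 then
          PySem.Set.add s (PySem.List.pyGetD label (r * numCols + c) 0)
        else s)
        PySem.Set.empty
    let total :=
      (PySem.List.pyRange 0 numRows 1).foldl (fun t r =>
        (PySem.List.pyRange 0 numCols 1).foldl (fun t cc =>
          if pvLandAt land r cc ≠ 0 ∧ PySem.List.pyGetD label (r * numCols + cc) 0 ∈ colLabels
          then t + 1 else t) t)
        (0 : Int)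
    acc ++ [total]) []

def solution_alt (land : List (List Int)) : Int :=
  let label := pvAltLabel land
  let colCnt := pvAltColCnt land label
  (PySem.List.max? colCnt (fun v => v)).getD 0

-- ===== PRECONDITION & SPEC =====
-- Pre_ excludes exactly the inputs where A raises: an empty grid (IndexError on the first row),
-- an empty first row (max() of an empty tally list), and a later row shorter than the first row (IndexError).
def Pre_solution (land : List (List Int)) : Prop :=
  land ≠ [] ∧ 0 < land.headI.length ∧ ∀ row ∈ land, land.headI.length ≤ row.length
instance (land : List (List Int)) : Decidable (Pre_solution land) := by unfold Pre_solution; infer_instance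
def pvWitness_solution : List (List Int) := [[0, 1], [1, 1]]

def Spec_solution (land : List (List Int)) (out : Int) : Prop := out = solution_alt land
instance (land : List (List Int)) (out : Int) : Decidable (Spec_solution land out) := by
  unfold Spec_solution; infer_instance

-- ===== CLAIM (what is proved, stated in full; the proofs are below) =====
def Claim_equal_solution : Prop :=
  ∀ (land : List (List Int)), Dom_solution land → Pre_solution land → Spec_solution land (solution land)

-- ===== LEMMAS AND PROOFS =====

-- shared abstractions: grid sizes, good (in-bounds, nonzero) cells, 4-adjacency, connectivity
def pvR (land : List (List Int)) : Int := (land.length : Int)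
def pvC (land : List (List Int)) : Int := ((PySem.List.pyGetD land 0 []).length : Int)

def pvGood (land : List (List Int)) (p : Int × Int) : Prop :=
  0 ≤ p.1 ∧ p.1 < pvR land ∧ 0 ≤ p.2 ∧ p.2 < pvC land ∧ pvLandAt land p.1 p.2 ≠ 0

def pvAdj (land : List (List Int)) (p q : Int × Int) : Prop :=
  pvGood land p ∧ pvGood land q ∧ ((p.1 - q.1).natAbs + (p.2 - q.2).natAbs = 1)

def pvConn (land : List (List Int)) : Int × Int → Int × Int → Prop :=
  Relation.ReflTransGen (pvAdj land)

def pvTouch (land : List (List Int)) (q : Int × Int) (c : Int) : Prop :=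
  ∃ n, pvConn land q n ∧ n.2 = c

-- the common value: per column c, the number of good cells whose component reaches column c
noncomputable def pvCnt (land : List (List Int)) (c : Int) : Nat :=
  List.countP (fun q => @decide _ (Classical.propDecidable (pvGood land q ∧ pvTouch land q c)))
    (pvAllCells (pvR land) (pvC land))

noncomputable def pvSpecList (land : List (List Int)) : List Int :=
  (PySem.List.pyRange 0 (pvC land) 1).map (fun c => (pvCnt land c : Int))

theorem pvAdj_symm (land : List (List Int)) : Symmetric (pvAdj land) := by
  intro p q h
  obtain ⟨hp, hq, hd⟩ := h
  exact ⟨hq, hp, by omega⟩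

theorem pvConn_symm (land : List (List Int)) : Symmetric (pvConn land) :=
  Relation.ReflTransGen.symmetric (pvAdj_symm land)

theorem pvConn_good (land : List (List Int)) (p q : Int × Int) (h : pvConn land p q)
    (hp : pvGood land p) : pvGood land q := by
  induction h with
  | refl => exact hp
  | tail _ hadj ih => exact hadj.2.1

-- characterization of one BFS queue step (the 4-direction for-loop)
theorem pvNbrs_aux (land : List (List Int)) (numRows numCols : Int) (y x : Int)
    (hs : List Int) (st : pvSt) :
    ∃ new : List (Int × Int),
      hs.foldl (pvNbrsStep land numRows numCols y x) st
        = (st.1 ++ new, st.2.1 ++ new,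
           List.foldl PySem.Set.add st.2.2.1 (new.map Prod.snd),
           st.2.2.2 + (new.length : Int)) ∧
      new.Nodup ∧
      (∀ n : Int × Int, n ∈ new ↔ (∃ h ∈ hs, n = pvNbr y x h) ∧ 0 ≤ n.1 ∧ n.1 < numRows
        ∧ 0 ≤ n.2 ∧ n.2 < numCols ∧ pvLandAt land n.1 n.2 ≠ 0 ∧ n ∉ st.2.1) := by
  induction hs generalizing st with
  | nil =>
      refine ⟨[], by simp, by simp, by simp⟩
  | cons h t ih =>
      simp only [List.foldl_cons]
      by_cases hg1 : 0 ≤ (pvNbr y x h).1 ∧ (pvNbr y x h).1 < numRows ∧ 0 ≤ (pvNbr y x h).2 ∧ (pvNbr y x h).2 < numCols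
      · by_cases hg2 : pvNbr y x h ∉ st.2.1 ∧ pvLandAt land (pvNbr y x h).1 (pvNbr y x h).2 ≠ 0
        · have hstep : pvNbrsStep land numRows numCols y x st h
              = (st.1 ++ [pvNbr y x h], PySem.Set.add st.2.1 (pvNbr y x h),
                 PySem.Set.add st.2.2.1 (pvNbr y x h).2, st.2.2.2 + 1) := by
            unfold pvNbrsStep
            rw [if_pos hg1, if_pos hg2]
          rw [hstep]
          obtain ⟨new', heq, hnd, hmem⟩ :=
            ih (st.1 ++ [pvNbr y x h], PySem.Set.add st.2.1 (pvNbr y x h),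
                PySem.Set.add st.2.2.1 (pvNbr y x h).2, st.2.2.2 + 1)
          rw [PySem.Set.add_of_not_mem hg2.1] at heq hmem ⊢
          dsimp only at heq hmem
          refine ⟨pvNbr y x h :: new', ?_, ?_, ?_⟩
          · rw [heq]
            simp only [Prod.mk.injEq]
            refine ⟨by simp, by simp, ?_, by push_cast [List.length_cons]; ring⟩
            rfl
          · rw [List.nodup_cons]
            refine ⟨fun hc => ?_, hnd⟩
            have := ((hmem _).mp hc).2.2.2.2.2.2
            simp at this
          · intro n
            simp only [List.mem_cons, hmem n]
            constructor
            · rintro (rfl | ⟨⟨h', hh', hn⟩, b1, b2, b3, b4, b5, b6⟩)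
              · exact ⟨⟨h, Or.inl rfl, rfl⟩, hg1.1, hg1.2.1, hg1.2.2.1, hg1.2.2.2, hg2.2, hg2.1⟩
              · have b6' : n ∉ st.2.1 := by
                  intro hc; exact b6 (by simp [hc])
                exact ⟨⟨h', Or.inr hh', hn⟩, b1, b2, b3, b4, b5, b6'⟩
            · rintro ⟨⟨h', hh', hn⟩, b1, b2, b3, b4, b5, b6⟩
              by_cases hnp : n = pvNbr y x h
              · exact Or.inl hnp
              · rcases hh' with he | h''
                · exact absurd (he ▸ hn) hnp
                · refine Or.inr ⟨⟨h', h'', hn⟩, b1, b2, b3, b4, b5, ?_⟩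
                  simp only [List.mem_append, List.mem_singleton]
                  rintro (hc | hc)
                  · exact b6 hc
                  · exact hnp hc
        · have hstep : pvNbrsStep land numRows numCols y x st h = st := by
            unfold pvNbrsStep
            rw [if_pos hg1, if_neg hg2]
          rw [hstep]
          obtain ⟨new', heq, hnd, hmem⟩ := ih st
          refine ⟨new', heq, hnd, fun n => ?_⟩
          rw [hmem n]
          constructor
          · rintro ⟨⟨h', hh', hn⟩, rest⟩
            exact ⟨⟨h', List.mem_cons_of_mem _ hh', hn⟩, rest⟩
          · rintro ⟨⟨h', hh', hn⟩, b1, b2, b3, b4, b5, b6⟩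
            rcases List.mem_cons.mp hh' with he | h''
            · exfalso
              rw [he] at hn
              rw [not_and_or, not_not] at hg2
              rcases hg2 with hc | hc
              · exact b6 (hn ▸ hc)
              · rw [← hn] at hc
                exact b5 (not_not.mp hc)
            · exact ⟨⟨h', h'', hn⟩, b1, b2, b3, b4, b5, b6⟩
      · have hstep : pvNbrsStep land numRows numCols y x st h = st := by
          unfold pvNbrsStep
          rw [if_neg hg1]
        rw [hstep]
        obtain ⟨new', heq, hnd, hmem⟩ := ih st
        refine ⟨new', heq, hnd, fun n => ?_⟩
        rw [hmem n]
        constructor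
        · rintro ⟨⟨h', hh', hn⟩, rest⟩
          exact ⟨⟨h', List.mem_cons_of_mem _ hh', hn⟩, rest⟩
        · rintro ⟨⟨h', hh', hn⟩, b1, b2, b3, b4, b5, b6⟩
          rcases List.mem_cons.mp hh' with he | h''
          · exfalso
            rw [he] at hn
            rw [hn] at b1 b2 b3 b4
            exact hg1 ⟨b1, b2, b3, b4⟩
          · exact ⟨⟨h', h'', hn⟩, b1, b2, b3, b4, b5, b6⟩

theorem pv_exists_nbr_iff (y x : Int) (n : Int × Int) :
    (∃ h ∈ PySem.List.pyRange 0 4 1, n = pvNbr y x h)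
      ↔ (y - n.1).natAbs + (x - n.2).natAbs = 1 := by
  have hr : PySem.List.pyRange 0 4 1 = [0, 1, 2, 3] := by decide
  have h0 : pvNbr y x 0 = (y - 1, x) := by
    simp [pvNbr, pvDy, pvDx, PySem.List.pyGetD]; ring
  have h1 : pvNbr y x 1 = (y + 1, x) := by
    simp [pvNbr, pvDy, pvDx, PySem.List.pyGetD]
  have h2 : pvNbr y x 2 = (y, x - 1) := by
    simp [pvNbr, pvDy, pvDx, PySem.List.pyGetD]; ring
  have h3 : pvNbr y x 3 = (y, x + 1) := by
    simp [pvNbr, pvDy, pvDx, PySem.List.pyGetD]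
  rw [hr]
  constructor
  · rintro ⟨h, hmem, rfl⟩
    simp only [List.mem_cons, List.not_mem_nil, or_false] at hmem
    rcases hmem with rfl | rfl | rfl | rfl
    · rw [h0]; dsimp only; omega
    · rw [h1]; dsimp only; omega
    · rw [h2]; dsimp only; omega
    · rw [h3]; dsimp only; omega
  · intro hd
    obtain ⟨n1, n2⟩ := n
    simp only at hd
    have : (n1 = y - 1 ∧ n2 = x) ∨ (n1 = y + 1 ∧ n2 = x) ∨ (n1 = y ∧ n2 = x - 1) ∨ (n1 = y ∧ n2 = x + 1) := by
      omega
    rcases this with ⟨rfl, rfl⟩ | ⟨rfl, rfl⟩ | ⟨rfl, rfl⟩ | ⟨rfl, rfl⟩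
    · exact ⟨0, by simp, h0.symm⟩
    · exact ⟨1, by simp, h1.symm⟩
    · exact ⟨2, by simp, h2.symm⟩
    · exact ⟨3, by simp, h3.symm⟩

-- BFS loop invariant: starting inside the component of s0, the loop collects exactly that component
theorem pvBfs_inv (land : List (List Int)) (s0 : Int × Int) (vis0 : List (Int × Int))
    (hs0 : pvGood land s0)
    (que : List (Int × Int)) (vis : PySem.Set (Int × Int)) (colh : PySem.Set Int) (cnt : Int)
    (S : List (Int × Int))
    (hI1 : vis = vis0 ++ S) (hI2 : S.Nodup) (hI3 : ∀ q ∈ S, q ∉ vis0)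
    (hI4 : ∀ q ∈ S, pvConn land s0 q)
    (hI5 : ∀ q ∈ que, q ∈ S) (hI5' : que.Nodup)
    (hI6 : ∀ q ∈ S, q ∉ que → ∀ n, pvAdj land q n → n ∈ vis0 ++ S)
    (hI7 : cnt = (S.length : Int))
    (hI8 : colh.Nodup) (hI9 : ∀ c, c ∈ colh ↔ ∃ q ∈ S, q.2 = c) :
    ∃ (S' : List (Int × Int)) (colh' : PySem.Set Int),
      pvBfs land (pvR land) (pvC land) que vis colh cnt = (vis0 ++ S', colh', (S'.length : Int)) ∧
      S'.Nodup ∧ (∀ q ∈ S', q ∉ vis0) ∧ (∀ q ∈ S', pvConn land s0 q) ∧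
      (∀ q ∈ S', ∀ n, pvAdj land q n → n ∈ vis0 ++ S') ∧
      colh'.Nodup ∧ (∀ c, c ∈ colh' ↔ ∃ q ∈ S', q.2 = c) ∧ (∀ q ∈ S, q ∈ S') := by
  fun_induction pvBfs land (pvR land) (pvC land) que vis colh cnt
    generalizing S with
  | case1 vis colh cnt =>
      refine ⟨S, colh, by rw [hI1, hI7], hI2, hI3, hI4, ?_, hI8, hI9, fun q hq => hq⟩
      intro q hq n hadj
      exact hI6 q hq (List.not_mem_nil) n hadj
  | case2 vis colh cnt y x rest st ih =>
      obtain ⟨new, heq, hnd, hmem⟩ := pvNbrs_aux land (pvR land) (pvC land) y x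
        (PySem.List.pyRange 0 4 1) (rest, vis, colh, cnt)
      have hyx : (y, x) ∈ S := hI5 _ (List.mem_cons_self)
      have hyxConn : pvConn land s0 (y, x) := hI4 _ hyx
      have hyxGood : pvGood land (y, x) := pvConn_good land s0 (y, x) hyxConn hs0
      -- membership in new, in terms of adjacency
      have hmem' : ∀ n, n ∈ new ↔ pvAdj land (y, x) n ∧ n ∉ vis := by
        intro n
        rw [hmem n]
        constructor
        · rintro ⟨hex, b1, b2, b3, b4, b5, b6⟩
          refine ⟨⟨hyxGood, ⟨b1, b2, b3, b4, b5⟩, ?_⟩, b6⟩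
          have := (pv_exists_nbr_iff y x n).mp hex
          simpa using this
        · rintro ⟨⟨_, hgn, hd⟩, hnv⟩
          refine ⟨(pv_exists_nbr_iff y x n).mpr (by simpa using hd),
            hgn.1, hgn.2.1, hgn.2.2.1, hgn.2.2.2.1, hgn.2.2.2.2, hnv⟩
      have hnewNotVis : ∀ n ∈ new, n ∉ vis := fun n hn => ((hmem' n).mp hn).2
      have hnewAdj : ∀ n ∈ new, pvAdj land (y, x) n := fun n hn => ((hmem' n).mp hn).1
      -- the new ghost set
      have hnewS : ∀ n ∈ new, n ∉ S := by
        intro n hn hc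
        exact hnewNotVis n hn (by rw [hI1]; exact List.mem_append_right _ hc)
      have hnewV0 : ∀ n ∈ new, n ∉ vis0 := by
        intro n hn hc
        exact hnewNotVis n hn (by rw [hI1]; exact List.mem_append_left _ hc)
      have hrestS : ∀ q ∈ rest, q ∈ S := fun q hq => hI5 _ (List.mem_cons_of_mem _ hq)
      have hst : st = (rest ++ new, vis ++ new,
          List.foldl PySem.Set.add colh (new.map Prod.snd), cnt + (new.length : Int)) := heq
      rw [hst] at ih
      dsimp only at ih
      obtain ⟨S', colh', hres, c2, c3, c4, c5, c6, c7, c8⟩ :=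
        ih (S ++ new)
          (by rw [hI1, List.append_assoc])
          (by
            rw [List.nodup_append]
            exact ⟨hI2, hnd, fun a ha b hb hab => hnewS b hb (hab ▸ ha)⟩)
          (by
            intro q hq
            rcases List.mem_append.mp hq with h | h
            · exact hI3 q h
            · exact hnewV0 q h)
          (by
            intro q hq
            rcases List.mem_append.mp hq with h | h
            · exact hI4 q h
            · exact Relation.ReflTransGen.tail hyxConn (hnewAdj q h))
          (by
            intro q hq
            rcases List.mem_append.mp hq with h | h
            · exact List.mem_append_left _ (hrestS q h)
            · exact List.mem_append_right _ h)
          (by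
            rw [List.nodup_append]
            refine ⟨List.Nodup.of_cons hI5', hnd, fun a ha b hb hab => ?_⟩
            exact hnewNotVis b hb (by rw [hI1]; exact List.mem_append_right _ (hrestS b (hab ▸ ha))))
          (by
            intro q hq hnq n hadj
            rcases List.mem_append.mp hq with h | h
            · by_cases hq0 : q = (y, x)
              · subst hq0
                by_cases hnvis : n ∈ vis
                · rw [hI1] at hnvis
                  rcases List.mem_append.mp hnvis with h' | h'
                  · exact List.mem_append_left _ h'
                  · exact List.mem_append_right _ (List.mem_append_left _ h')
                · have : n ∈ new := (hmem' n).mpr ⟨hadj, hnvis⟩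
                  exact List.mem_append_right _ (List.mem_append_right _ this)
              · have hqq : q ∉ (y, x) :: rest := by
                  intro hc
                  rcases List.mem_cons.mp hc with hc' | hc'
                  · exact hq0 hc'
                  · exact hnq (List.mem_append_left _ hc')
                have := hI6 q h hqq n hadj
                rcases List.mem_append.mp this with h' | h'
                · exact List.mem_append_left _ h'
                · exact List.mem_append_right _ (List.mem_append_left _ h')
            · exact absurd (List.mem_append_right _ h) hnq)
          (by
            rw [hI7]
            push_cast [List.length_append]
            ring)
          (by
            show (PySem.Set.update colh (new.map Prod.snd)).Nodup
            exact PySem.Set.nodup_update colh _ hI8)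
          (by
            intro c
            show c ∈ PySem.Set.update colh (new.map Prod.snd) ↔ _
            rw [PySem.Set.mem_update colh _ c]
            constructor
            · rintro (h | h)
              · obtain ⟨q, hq, hq2⟩ := (hI9 c).mp h
                exact ⟨q, List.mem_append_left _ hq, hq2⟩
              · obtain ⟨q, hq, hq2⟩ := List.mem_map.mp h
                exact ⟨q, List.mem_append_right _ hq, hq2⟩
            · rintro ⟨q, hq, hq2⟩
              rcases List.mem_append.mp hq with h | h
              · exact Or.inl ((hI9 c).mpr ⟨q, h, hq2⟩)
              · exact Or.inr (List.mem_map.mpr ⟨q, h, hq2⟩))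
      refine ⟨S', colh', ?_, c2, c3, c4, c5, c6, c7,
        fun q hq => c8 q (List.mem_append_left _ hq)⟩
      rw [hst]
      exact hres

-- closure of a saturated visited set under connectivity
theorem pvSat_conn (land : List (List Int)) (vis0 : List (Int × Int))
    (hsat : ∀ q ∈ vis0, ∀ n, pvAdj land q n → n ∈ vis0) :
    ∀ q n, q ∈ vis0 → pvConn land q n → n ∈ vis0 := by
  intro q n hq hconn
  induction hconn with
  | refl => exact hq
  | tail _ hadj ih => exact hsat _ ih _ hadj

-- one full BFS from an unvisited good cell collects exactly its connected component
theorem pvBfs_comp (land : List (List Int)) (s0 : Int × Int) (vis0 : List (Int × Int))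
    (hs0 : pvGood land s0)
    (hsat : ∀ q ∈ vis0, ∀ n, pvAdj land q n → n ∈ vis0) (hnv : s0 ∉ vis0) :
    ∃ (S : List (Int × Int)) (colh' : PySem.Set Int),
      pvBfs land (pvR land) (pvC land) [s0] (PySem.Set.add vis0 s0)
          (PySem.Set.add PySem.Set.empty s0.2) 1
        = (vis0 ++ S, colh', (S.length : Int)) ∧
      S.Nodup ∧ (∀ q, q ∈ S ↔ pvConn land s0 q) ∧ (∀ q ∈ S, q ∉ vis0) ∧
      colh'.Nodup ∧ (∀ c, c ∈ colh' ↔ ∃ q, pvConn land s0 q ∧ q.2 = c) := by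
  have hadd : PySem.Set.add vis0 s0 = vis0 ++ [s0] := PySem.Set.add_of_not_mem hnv
  have hcolh : PySem.Set.add PySem.Set.empty s0.2 = [s0.2] := rfl
  obtain ⟨S', colh', hres, c2, c3, c4, c5, c6, c7, c8⟩ :=
    pvBfs_inv land s0 vis0 hs0 [s0] (PySem.Set.add vis0 s0) (PySem.Set.add PySem.Set.empty s0.2) 1
      [s0] (by rw [hadd]) (by simp) (by simpa using hnv)
      (by simpa using Relation.ReflTransGen.refl)
      (by simp) (by simp)
      (by
        intro q hq hnq
        simp only [List.mem_singleton] at hq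
        exact absurd (by simp [hq]) hnq)
      (by simp) (by rw [hcolh]; simp)
      (by intro c; rw [hcolh]; simp [eq_comm])
  have hs0S : s0 ∈ S' := c8 s0 (by simp)
  have hSconn : ∀ q, q ∈ S' ↔ pvConn land s0 q := by
    intro q
    constructor
    · exact c4 q
    · intro hconn
      have hmem : ∀ m, pvConn land s0 m → m ∈ vis0 ++ S' := by
        intro m hm
        induction hm with
        | refl => exact List.mem_append_right _ hs0S
        | tail hbc hadj ih =>
            rcases List.mem_append.mp ih with h | h
            · exact List.mem_append_left _ (hsat _ h _ hadj)
            · exact c5 _ h _ hadj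
      rcases List.mem_append.mp (hmem q hconn) with h | h
      · exfalso
        have := pvSat_conn land vis0 hsat q s0 h (pvConn_symm land hconn)
        exact hnv this
      · exact h
  refine ⟨S', colh', hres, c2, hSconn, c3, c6, ?_⟩
  intro c
  rw [c7 c]
  constructor
  · rintro ⟨q, hq, hq2⟩
    exact ⟨q, (hSconn q).mp hq, hq2⟩
  · rintro ⟨q, hq, hq2⟩
    exact ⟨q, (hSconn q).mpr hq, hq2⟩

-- col_cnt bookkeeping: updating a range-indexed tally list at a set of in-range columns
theorem pvSet_map_range (C : Int) (f : Int → Int) (c0 v : Int) (h0 : 0 ≤ c0) (h1 : c0 < C) :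
    PySem.List.pySetD ((PySem.List.pyRange 0 C 1).map f) c0 v
      = (PySem.List.pyRange 0 C 1).map (fun c => if c = c0 then v else f c) := by
  rw [PySem.List.pySetD_of_nonneg (h := h0)]
  apply List.ext_getElem
  · simp
  · intro k hk1 hk2
    simp only [List.getElem_set, List.getElem_map, PySem.List.getElem_pyRange_one]
    have hkC : (k : Int) < C := by
      simp only [List.length_set, List.length_map, PySem.List.length_pyRange_one] at hk1
      omega
    by_cases hk : c0.toNat = k
    · rw [if_pos hk, if_pos (by omega)]
    · rw [if_neg hk, if_neg (by omega)]

theorem pvFold_update (C : Int) (L : List Int) (hL : L.Nodup)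
    (hmem : ∀ c ∈ L, 0 ≤ c ∧ c < C) (f : Int → Int) (v : Int) :
    L.foldl (fun cc c => PySem.List.pySetD cc c (PySem.List.pyGetD cc c 0 + v))
        ((PySem.List.pyRange 0 C 1).map f)
      = (PySem.List.pyRange 0 C 1).map (fun c => f c + if c ∈ L then v else 0) := by
  induction L generalizing f with
  | nil => simp
  | cons c0 L' ih =>
      simp only [List.foldl_cons]
      have hc0 := hmem c0 (List.mem_cons_self)
      have hget : PySem.List.pyGetD ((PySem.List.pyRange 0 C 1).map f) c0 0 = f c0 :=
        PySem.List.pyGetD_map_pyRange_of_nonneg f C c0 0 hc0.1 hc0.2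
      rw [hget, pvSet_map_range C f c0 (f c0 + v) hc0.1 hc0.2,
        ih (List.Nodup.of_cons hL) (fun c hc => hmem c (List.mem_cons_of_mem _ hc))]
      apply List.map_congr_left
      intro c _
      by_cases hcc : c = c0
      · subst hcc
        have : c ∉ L' := (List.nodup_cons.mp hL).1
        simp [this]
      · simp [hcc]

-- tally of cells in vis whose component reaches column c
noncomputable def pvN (land : List (List Int)) (c : Int) (vis : List (Int × Int)) : Nat :=
  (vis.filter (fun q => @decide _ (Classical.propDecidable (pvTouch land q c)))).length

theorem pv_mem_allCells (numRows numCols : Int) (p : Int × Int) :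
    p ∈ pvAllCells numRows numCols ↔ 0 ≤ p.1 ∧ p.1 < numRows ∧ 0 ≤ p.2 ∧ p.2 < numCols := by
  cases p with | mk a b =>
  simp [pvAllCells, PySem.List.mem_pyRange_one, and_assoc]

theorem pvTouch_congr (land : List (List Int)) (p q : Int × Int) (c : Int)
    (h : pvConn land p q) : pvTouch land q c ↔ pvTouch land p c :=
  ⟨fun ⟨n, hn, hc⟩ => ⟨n, Relation.ReflTransGen.trans h hn, hc⟩,
   fun ⟨n, hn, hc⟩ => ⟨n, Relation.ReflTransGen.trans (pvConn_symm land h) hn, hc⟩⟩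

theorem pvN_append (land : List (List Int)) (c : Int) (vis S : List (Int × Int)) :
    pvN land c (vis ++ S) = pvN land c vis
      + (S.filter (fun q => @decide _ (Classical.propDecidable (pvTouch land q c)))).length := by
  unfold pvN
  rw [List.filter_append, List.length_append]

-- the per-cell body of A's outer double loop
def pvBody (land : List (List Int)) (st : List Int × PySem.Set (Int × Int)) (p : Int × Int) :
    List Int × PySem.Set (Int × Int) :=
  if p ∉ st.2 ∧ pvLandAt land p.1 p.2 ≠ 0 then
    let res := pvBfs land (pvR land) (pvC land) [p] (PySem.Set.add st.2 p)
                 (PySem.Set.add PySem.Set.empty p.2) 1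
    (res.2.1.foldl (fun cc c => PySem.List.pySetD cc c (PySem.List.pyGetD cc c 0 + res.2.2)) st.1,
     res.1)
  else st

theorem solution_eq_fold (land : List (List Int)) :
    solution land = (PySem.List.max?
      ((pvAllCells (pvR land) (pvC land)).foldl (pvBody land)
        ((PySem.List.pyRange 0 (pvC land) 1).map (fun _ => (0 : Int)), PySem.Set.empty)).1
      (fun v => v)).getD 0 := by
  unfold solution pvBody pvAllCells
  rw [List.foldl_flatMap]
  simp only [List.foldl_map, PySem.List.len_eq]
  rfl

theorem pvOuter_inv (land : List (List Int)) (todo : List (Int × Int)) (P : List (Int × Int))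
    (htodo : ∀ p ∈ todo, p ∈ pvAllCells (pvR land) (pvC land))
    (vis : PySem.Set (Int × Int))
    (hvis : ∀ q, q ∈ vis ↔ pvGood land q ∧ ∃ p ∈ P, pvConn land p q)
    (hnd : List.Nodup vis) :
    ∃ vis' : PySem.Set (Int × Int),
      todo.foldl (pvBody land)
          ((PySem.List.pyRange 0 (pvC land) 1).map (fun c => (pvN land c vis : Int)), vis)
        = ((PySem.List.pyRange 0 (pvC land) 1).map (fun c => (pvN land c vis' : Int)), vis')
      ∧ (∀ q, q ∈ vis' ↔ pvGood land q ∧ ∃ p ∈ P ++ todo, pvConn land p q)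
      ∧ List.Nodup vis' := by
  induction todo generalizing P vis with
  | nil =>
      exact ⟨vis, rfl, by simpa using hvis, hnd⟩
  | cons p todo' ih =>
      have hsat : ∀ q ∈ vis, ∀ n, pvAdj land q n → n ∈ vis := by
        intro q hq n hadj
        obtain ⟨hg, p0, hp0, hconn⟩ := (hvis q).mp hq
        exact (hvis n).mpr ⟨hadj.2.1, p0, hp0, Relation.ReflTransGen.tail hconn hadj⟩
      simp only [List.foldl_cons]
      by_cases hguard : p ∉ vis ∧ pvLandAt land p.1 p.2 ≠ 0
      · have hpb := htodo p (List.mem_cons_self)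
        rw [pv_mem_allCells] at hpb
        have hpGood : pvGood land p := ⟨hpb.1, hpb.2.1, hpb.2.2.1, hpb.2.2.2, hguard.2⟩
        obtain ⟨S, colh, hres, hSnd, hSconn, hSdis, hcolhnd, hcolhmem⟩ :=
          pvBfs_comp land p vis hpGood hsat hguard.1
        have hbody : pvBody land
            ((PySem.List.pyRange 0 (pvC land) 1).map (fun c => (pvN land c vis : Int)), vis) p
            = ((PySem.List.pyRange 0 (pvC land) 1).map (fun c => (pvN land c (vis ++ S) : Int)),
               vis ++ S) := by
          unfold pvBody
          rw [if_pos (by exact hguard)]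
          dsimp only
          rw [hres]
          dsimp only
          rw [pvFold_update (pvC land) colh hcolhnd
            (by
              intro c hc
              obtain ⟨q, hq, hq2⟩ := (hcolhmem c).mp hc
              have := pvConn_good land p q hq hpGood
              subst hq2
              exact ⟨this.2.2.1, this.2.2.2.1⟩)]
          refine congrArg₂ _ ?_ rfl
          apply List.map_congr_left
          intro c _
          rw [pvN_append]
          by_cases htc : pvTouch land p c
          · have hfilter : S.filter (fun q => @decide _ (Classical.propDecidable (pvTouch land q c))) = S := by
              rw [List.filter_eq_self]
              intro q hq
              exact @decide_eq_true _ (Classical.propDecidable _) ((pvTouch_congr land p q c ((hSconn q).mp hq)).mpr htc)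
            rw [hfilter, if_pos ((hcolhmem c).mpr htc)]
            push_cast
            ring
          · have hfilter : S.filter (fun q => @decide _ (Classical.propDecidable (pvTouch land q c))) = [] := by
              rw [List.filter_eq_nil_iff]
              intro q hq hdec
              exact htc ((pvTouch_congr land p q c ((hSconn q).mp hq)).mp (@of_decide_eq_true _ (Classical.propDecidable _) hdec))
            rw [hfilter, if_neg (fun hc => htc ((hcolhmem c).mp hc))]
            simp
        rw [hbody]
        obtain ⟨vis', hres', hvis', hnd'⟩ :=
          ih (P ++ [p]) (fun q hq => htodo q (List.mem_cons_of_mem _ hq)) (vis ++ S)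
            (by
              intro q
              constructor
              · intro hq
                rcases List.mem_append.mp hq with h | h
                · obtain ⟨hg, p0, hp0, hconn⟩ := (hvis q).mp h
                  exact ⟨hg, p0, List.mem_append_left _ hp0, hconn⟩
                · refine ⟨pvConn_good land p q ((hSconn q).mp h) hpGood,
                    p, List.mem_append_right _ (by simp), (hSconn q).mp h⟩
              · rintro ⟨hg, p0, hp0, hconn⟩
                rcases List.mem_append.mp hp0 with h | h
                · exact List.mem_append_left _ ((hvis q).mpr ⟨hg, p0, h, hconn⟩)
                · rw [List.mem_singleton] at h
                  subst h
                  exact List.mem_append_right _ ((hSconn q).mpr hconn))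
            (by
              rw [List.nodup_append]
              exact ⟨hnd, hSnd, fun a ha b hb hab => hSdis b hb (hab ▸ ha)⟩)
        refine ⟨vis', hres', ?_, hnd'⟩
        intro q
        rw [hvis' q]
        simp [List.mem_append, List.mem_cons]
      · have hbody : pvBody land
            ((PySem.List.pyRange 0 (pvC land) 1).map (fun c => (pvN land c vis : Int)), vis) p
            = ((PySem.List.pyRange 0 (pvC land) 1).map (fun c => (pvN land c vis : Int)), vis) := by
          unfold pvBody
          rw [if_neg (by exact hguard)]
        rw [hbody]
        obtain ⟨vis', hres', hvis', hnd'⟩ :=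
          ih (P ++ [p]) (fun q hq => htodo q (List.mem_cons_of_mem _ hq)) vis
            (by
              intro q
              constructor
              · intro hq
                obtain ⟨hg, p0, hp0, hconn⟩ := (hvis q).mp hq
                exact ⟨hg, p0, List.mem_append_left _ hp0, hconn⟩
              · rintro ⟨hg, p0, hp0, hconn⟩
                rcases List.mem_append.mp hp0 with h | h
                · exact (hvis q).mpr ⟨hg, p0, h, hconn⟩
                · rw [List.mem_singleton] at h
                  rw [h] at hconn
                  rw [not_and_or, not_not] at hguard
                  rcases hguard with hc | hc
                  · obtain ⟨hg0, p1, hp1, hconn1⟩ := (hvis p).mp hc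
                    exact (hvis q).mpr ⟨hg, p1, hp1, Relation.ReflTransGen.trans hconn1 hconn⟩
                  · rcases Relation.ReflTransGen.cases_head hconn with he | ⟨n, hadj, _⟩
                    · exfalso
                      rw [← he] at hg
                      exact hc hg.2.2.2.2
                    · exact absurd hadj.1.2.2.2.2 hc)
            hnd
        refine ⟨vis', hres', ?_, hnd'⟩
        intro q
        rw [hvis' q]
        simp [List.mem_append, List.mem_cons]

theorem pvAllCells_nodup (R C : Int) : (pvAllCells R C).Nodup := by
  unfold pvAllCells
  rw [List.nodup_flatMap]
  constructor
  · intro r _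
    exact (PySem.List.nodup_pyRange_one 0 C).map (fun a b h => by simpa using h)
  · apply List.Pairwise.imp ?_ (PySem.List.pairwise_lt_pyRange_one 0 R)
    intro a b hab x hx hy
    simp only [List.mem_map] at hx hy
    obtain ⟨c1, _, rfl⟩ := hx
    obtain ⟨c2, _, h⟩ := hy
    have := congrArg Prod.fst h.symm
    simp only at this
    omega

theorem solution_eq_spec (land : List (List Int)) :
    solution land = (PySem.List.max? (pvSpecList land) (fun v => v)).getD 0 := by
  rw [solution_eq_fold]
  have hinit : ((PySem.List.pyRange 0 (pvC land) 1).map (fun _ => (0 : Int)))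
      = (PySem.List.pyRange 0 (pvC land) 1).map (fun c => (pvN land c [] : Int)) := by
    apply List.map_congr_left
    intro c _
    simp [pvN]
  obtain ⟨vis', hres', hvis', hnd'⟩ :=
    pvOuter_inv land (pvAllCells (pvR land) (pvC land)) [] (fun p h => h) []
      (by simp) (by simp)
  have hempty : (PySem.Set.empty : PySem.Set (Int × Int)) = ([] : List (Int × Int)) := rfl
  rw [hinit, hempty, hres']
  have hvisGood : ∀ q, q ∈ vis' ↔ pvGood land q := by
    intro q
    rw [hvis' q]
    constructor
    · rintro ⟨hg, _⟩; exact hg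
    · intro hg
      refine ⟨hg, q, ?_, Relation.ReflTransGen.refl⟩
      rw [List.nil_append, pv_mem_allCells]
      exact ⟨hg.1, hg.2.1, hg.2.2.1, hg.2.2.2.1⟩
  have hcount : ∀ c, pvN land c vis' = pvCnt land c := by
    intro c
    unfold pvN pvCnt
    rw [List.countP_eq_length_filter]
    apply List.Perm.length_eq
    apply List.perm_of_nodup_nodup_toFinset_eq (hnd'.filter _)
      ((pvAllCells_nodup (pvR land) (pvC land)).filter _)
    ext x
    simp only [List.mem_toFinset, List.mem_filter]
    constructor
    · rintro ⟨hx, hdec⟩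
      have hg := (hvisGood x).mp hx
      refine ⟨(pv_mem_allCells _ _ x).mpr ⟨hg.1, hg.2.1, hg.2.2.1, hg.2.2.2.1⟩, ?_⟩
      exact @decide_eq_true _ (Classical.propDecidable _)
        ⟨hg, @of_decide_eq_true _ (Classical.propDecidable _) hdec⟩
    · rintro ⟨hx, hdec⟩
      obtain ⟨hg, ht⟩ := @of_decide_eq_true _ (Classical.propDecidable _) hdec
      exact ⟨(hvisGood x).mpr hg, @decide_eq_true _ (Classical.propDecidable _) ht⟩
  unfold pvSpecList
  congr 2
  apply List.map_congr_left
  intro c _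
  rw [hcount c]

-- ===== B side =====
def pvInb (land : List (List Int)) (p : Int × Int) : Prop :=
  0 ≤ p.1 ∧ p.1 < pvR land ∧ 0 ≤ p.2 ∧ p.2 < pvC land

def pvIdx (land : List (List Int)) (p : Int × Int) : Int := p.1 * pvC land + p.2

def pvLab (label : List Int) (k : Int) : Int := PySem.List.pyGetD label k 0

theorem pvIdx_inj (land : List (List Int)) (p q : Int × Int)
    (hp : pvInb land p) (hq : pvInb land q) (h : pvIdx land p = pvIdx land q) : p = q := by
  obtain ⟨p1, p2⟩ := p
  obtain ⟨q1, q2⟩ := q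
  obtain ⟨a1, a2, a3, a4⟩ := hp
  obtain ⟨b1, b2, b3, b4⟩ := hq
  unfold pvIdx at h
  simp only at h a1 a2 a3 a4 b1 b2 b3 b4 ⊢
  have h1 : p1 = q1 := by
    rcases lt_trichotomy p1 q1 with hlt | he | hgt
    · exfalso
      have : (p1 + 1) * pvC land ≤ q1 * pvC land :=
        mul_le_mul_of_nonneg_right (by omega) (by omega)
      nlinarith
    · exact he
    · exfalso
      have : (q1 + 1) * pvC land ≤ p1 * pvC land :=
        mul_le_mul_of_nonneg_right (by omega) (by omega)
      nlinarith
  simp only [Prod.mk.injEq]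
  refine ⟨h1, ?_⟩
  rw [h1] at h
  linarith

theorem pvIdx_bounds (land : List (List Int)) (p : Int × Int) (hp : pvInb land p) :
    0 ≤ pvIdx land p ∧ pvIdx land p < pvR land * pvC land := by
  obtain ⟨a1, a2, a3, a4⟩ := hp
  unfold pvIdx
  constructor
  · nlinarith
  · have : (p.1 + 1) * pvC land ≤ pvR land * pvC land :=
      mul_le_mul_of_nonneg_right (by omega) (by omega)
    nlinarith

-- reflexive-transitive closure after adding one undirected edge
theorem pvRTG_extend (Rl : Int × Int → Int × Int → Prop) (α β p q : Int × Int) :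
    Relation.ReflTransGen (fun a b => Rl a b ∨ ((a = α ∧ b = β) ∨ (a = β ∧ b = α))) p q
      ↔ Relation.ReflTransGen Rl p q
        ∨ (Relation.ReflTransGen Rl p α ∧ Relation.ReflTransGen Rl β q)
        ∨ (Relation.ReflTransGen Rl p β ∧ Relation.ReflTransGen Rl α q) := by
  constructor
  · intro h
    induction h with
    | refl => exact Or.inl Relation.ReflTransGen.refl
    | @tail b c hpb hbc ih =>
        rcases hbc with hbc | ⟨rfl, rfl⟩ | ⟨rfl, rfl⟩
        · rcases ih with ih | ⟨ih1, ih2⟩ | ⟨ih1, ih2⟩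
          · exact Or.inl (ih.tail hbc)
          · exact Or.inr (Or.inl ⟨ih1, ih2.tail hbc⟩)
          · exact Or.inr (Or.inr ⟨ih1, ih2.tail hbc⟩)
        · rcases ih with ih | ⟨ih1, ih2⟩ | ⟨ih1, ih2⟩
          · exact Or.inr (Or.inl ⟨ih, Relation.ReflTransGen.refl⟩)
          · exact Or.inr (Or.inl ⟨ih1, Relation.ReflTransGen.refl⟩)
          · exact Or.inl ih1
        · rcases ih with ih | ⟨ih1, ih2⟩ | ⟨ih1, ih2⟩
          · exact Or.inr (Or.inr ⟨ih, Relation.ReflTransGen.refl⟩)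
          · exact Or.inl ih1
          · exact Or.inr (Or.inr ⟨ih1, Relation.ReflTransGen.refl⟩)
  · rintro (h | ⟨h1, h2⟩ | ⟨h1, h2⟩)
    · exact h.mono (fun a b hab => Or.inl hab)
    · have e1 : Relation.ReflTransGen (fun a b => Rl a b ∨ ((a = α ∧ b = β) ∨ (a = β ∧ b = α))) α β :=
        Relation.ReflTransGen.single (Or.inr (Or.inl ⟨rfl, rfl⟩))
      exact ((h1.mono (fun a b hab => Or.inl hab)).trans e1).trans
        (h2.mono (fun a b hab => Or.inl hab))
    · have e2 : Relation.ReflTransGen (fun a b => Rl a b ∨ ((a = α ∧ b = β) ∨ (a = β ∧ b = α))) β α :=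
        Relation.ReflTransGen.single (Or.inr (Or.inr ⟨rfl, rfl⟩))
      exact ((h1.mono (fun a b hab => Or.inl hab)).trans e2).trans
        (h2.mono (fun a b hab => Or.inl hab))

theorem pvIte_char (x y la lb : Int) :
    ((if x = lb then la else x) = (if y = lb then la else y))
      ↔ (x = y ∨ ((x = la ∨ x = lb) ∧ (y = la ∨ y = lb))) := by
  split_ifs <;> omega

-- one merge step refines the label kernel by one undirected edge
theorem pvMerge_kernel (land : List (List Int)) (α β : Int × Int)
    (hα : pvInb land α) (hβ : pvInb land β)
    (label : List Int) (hlen : (label.length : Int) = pvR land * pvC land)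
    (Rl : Int × Int → Int × Int → Prop) (hsym : Symmetric Rl)
    (hker : ∀ p q, pvInb land p → pvInb land q →
      (pvLab label (pvIdx land p) = pvLab label (pvIdx land q) ↔ Relation.ReflTransGen Rl p q)) :
    ((pvMerge label (pvIdx land α) (pvIdx land β)).length : Int) = pvR land * pvC land ∧
    (∀ p q, pvInb land p → pvInb land q →
      (pvLab (pvMerge label (pvIdx land α) (pvIdx land β)) (pvIdx land p)
        = pvLab (pvMerge label (pvIdx land α) (pvIdx land β)) (pvIdx land q)
        ↔ Relation.ReflTransGen (fun a b => Rl a b ∨ ((a = α ∧ b = β) ∨ (a = β ∧ b = α))) p q)) := by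
  unfold pvMerge
  by_cases heq : PySem.List.pyGetD label (pvIdx land α) 0 = PySem.List.pyGetD label (pvIdx land β) 0
  · rw [if_pos heq]
    refine ⟨hlen, fun p q hp hq => ?_⟩
    rw [hker p q hp hq, pvRTG_extend]
    have hαβ : Relation.ReflTransGen Rl α β := (hker α β hα hβ).mp heq
    constructor
    · exact Or.inl
    · rintro (h | ⟨h1, h2⟩ | ⟨h1, h2⟩)
      · exact h
      · exact (h1.trans hαβ).trans h2
      · exact (h1.trans ((Relation.ReflTransGen.symmetric hsym) hαβ)).trans h2
  · rw [if_neg heq]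
    have hlen' : ((label.map (fun v => if v = PySem.List.pyGetD label (pvIdx land β) 0
        then PySem.List.pyGetD label (pvIdx land α) 0 else v)).length : Int) = pvR land * pvC land := by
      rw [List.length_map]; exact hlen
    refine ⟨hlen', fun p q hp hq => ?_⟩
    have hmap : ∀ r, pvInb land r →
        pvLab (label.map (fun v => if v = PySem.List.pyGetD label (pvIdx land β) 0
          then PySem.List.pyGetD label (pvIdx land α) 0 else v)) (pvIdx land r)
        = (if pvLab label (pvIdx land r) = PySem.List.pyGetD label (pvIdx land β) 0
          then PySem.List.pyGetD label (pvIdx land α) 0 else pvLab label (pvIdx land r)) := by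
      intro r hr
      have hb := pvIdx_bounds land r hr
      unfold pvLab
      rw [PySem.List.pyGetD_eq_getElem _ 0 hb.1 (by simp only [List.length_map]; omega),
        List.getElem_map,
        PySem.List.pyGetD_eq_getElem label 0 hb.1 (by omega)]
    rw [hmap p hp, hmap q hq, pvRTG_extend, pvIte_char]
    have hpq := hker p q hp hq
    have hpα := hker p α hp hα
    have hpβ := hker p β hp hβ
    have hqα := hker q α hq hα
    have hqβ := hker q β hq hβ
    unfold pvLab at hpq hpα hpβ hqα hqβ ⊢
    rw [hpq, hpα, hpβ, hqα, hqβ]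
    have hRTGsym : Symmetric (Relation.ReflTransGen Rl) := Relation.ReflTransGen.symmetric hsym
    constructor
    · rintro (h | ⟨(h1 | h1), (h2 | h2)⟩)
      · exact Or.inl h
      · exact Or.inl (h1.trans (hRTGsym h2))
      · exact Or.inr (Or.inl ⟨h1, hRTGsym h2⟩)
      · exact Or.inr (Or.inr ⟨h1, hRTGsym h2⟩)
      · exact Or.inl (h1.trans (hRTGsym h2))
    · rintro (h | ⟨h1, h2⟩ | ⟨h1, h2⟩)
      · exact Or.inl h
      · exact Or.inr ⟨Or.inl h1, Or.inr (hRTGsym h2)⟩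
      · exact Or.inr ⟨Or.inr h1, Or.inl (hRTGsym h2)⟩

def pvERel (es : List ((Int × Int) × (Int × Int))) (a b : Int × Int) : Prop :=
  ∃ e ∈ es, (a = e.1 ∧ b = e.2) ∨ (a = e.2 ∧ b = e.1)

theorem pvRTG_congr {r r' : Int × Int → Int × Int → Prop}
    (h : ∀ a b, r a b ↔ r' a b) (p q : Int × Int) :
    Relation.ReflTransGen r p q ↔ Relation.ReflTransGen r' p q :=
  ⟨fun hh => hh.mono (fun a b hab => (h a b).mp hab),
   fun hh => hh.mono (fun a b hab => (h a b).mpr hab)⟩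

theorem pvMergeFold_kernel (land : List (List Int)) (es : List ((Int × Int) × (Int × Int)))
    (hall : ∀ e ∈ es, pvAdj land e.1 e.2)
    (label : List Int) (hlen : (label.length : Int) = pvR land * pvC land)
    (Rl : Int × Int → Int × Int → Prop) (hsym : Symmetric Rl)
    (hker : ∀ p q, pvInb land p → pvInb land q →
      (pvLab label (pvIdx land p) = pvLab label (pvIdx land q) ↔ Relation.ReflTransGen Rl p q)) :
    (((es.foldl (fun lab e => pvMerge lab (pvIdx land e.1) (pvIdx land e.2)) label).length : Int)
      = pvR land * pvC land) ∧
    (∀ p q, pvInb land p → pvInb land q →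
      (pvLab (es.foldl (fun lab e => pvMerge lab (pvIdx land e.1) (pvIdx land e.2)) label) (pvIdx land p)
        = pvLab (es.foldl (fun lab e => pvMerge lab (pvIdx land e.1) (pvIdx land e.2)) label) (pvIdx land q)
        ↔ Relation.ReflTransGen (fun a b => Rl a b ∨ pvERel es a b) p q)) := by
  induction es generalizing label Rl with
  | nil =>
      simp only [List.foldl_nil]
      refine ⟨hlen, fun p q hp hq => ?_⟩
      rw [hker p q hp hq]
      apply pvRTG_congr
      intro a b
      simp [pvERel]
  | cons e es' ih =>
      have hadj := hall e (List.mem_cons_self)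
      have hα : pvInb land e.1 := ⟨hadj.1.1, hadj.1.2.1, hadj.1.2.2.1, hadj.1.2.2.2.1⟩
      have hβ : pvInb land e.2 := ⟨hadj.2.1.1, hadj.2.1.2.1, hadj.2.1.2.2.1, hadj.2.1.2.2.2.1⟩
      obtain ⟨hlen1, hker1⟩ := pvMerge_kernel land e.1 e.2 hα hβ label hlen Rl hsym hker
      simp only [List.foldl_cons]
      obtain ⟨hlen2, hker2⟩ := ih (fun e' he' => hall e' (List.mem_cons_of_mem _ he'))
        (pvMerge label (pvIdx land e.1) (pvIdx land e.2)) hlen1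
        (fun a b => Rl a b ∨ ((a = e.1 ∧ b = e.2) ∨ (a = e.2 ∧ b = e.1)))
        (by
          intro a b hab
          rcases hab with h | ⟨h1, h2⟩ | ⟨h1, h2⟩
          · exact Or.inl (hsym h)
          · exact Or.inr (Or.inr ⟨h2, h1⟩)
          · exact Or.inr (Or.inl ⟨h2, h1⟩))
        hker1
      refine ⟨hlen2, fun p q hp hq => ?_⟩
      rw [hker2 p q hp hq]
      apply pvRTG_congr
      intro a b
      constructor
      · rintro ((h | h) | ⟨e', he', h⟩)
        · exact Or.inl h
        · exact Or.inr ⟨e, List.mem_cons_self, h⟩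
        · exact Or.inr ⟨e', List.mem_cons_of_mem _ he', h⟩
      · rintro (h | ⟨e', he', h⟩)
        · exact Or.inl (Or.inl h)
        · rcases List.mem_cons.mp he' with rfl | he''
          · exact Or.inl (Or.inr h)
          · exact Or.inr ⟨e', he'', h⟩

-- the (at most two) union-find edges contributed by one cell in B
def pvCellEdges (land : List (List Int)) (p : Int × Int) : List ((Int × Int) × (Int × Int)) :=
  (if pvLandAt land p.1 p.2 ≠ 0 ∧ p.2 + 1 < pvC land ∧ pvLandAt land p.1 (p.2 + 1) ≠ 0
   then [(p, (p.1, p.2 + 1))] else [])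
  ++ (if pvLandAt land p.1 p.2 ≠ 0 ∧ p.1 + 1 < pvR land ∧ pvLandAt land (p.1 + 1) p.2 ≠ 0
   then [(p, (p.1 + 1, p.2))] else [])

def pvAllEdges (land : List (List Int)) : List ((Int × Int) × (Int × Int)) :=
  (pvAllCells (pvR land) (pvC land)).flatMap (pvCellEdges land)

def pvLabelF (land : List (List Int)) : List Int :=
  (pvAllEdges land).foldl (fun lab e => pvMerge lab (pvIdx land e.1) (pvIdx land e.2))
    (PySem.List.pyRange 0 (pvR land * pvC land) 1)

theorem pvAllEdges_adj (land : List (List Int)) : ∀ e ∈ pvAllEdges land, pvAdj land e.1 e.2 := by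
  intro e he
  unfold pvAllEdges at he
  rw [List.mem_flatMap] at he
  obtain ⟨p, hp, hep⟩ := he
  obtain ⟨p1, p2⟩ := p
  rw [pv_mem_allCells] at hp
  simp only at hp
  obtain ⟨b1, b2, b3, b4⟩ := hp
  unfold pvCellEdges at hep
  rw [List.mem_append] at hep
  rcases hep with h | h
  · split_ifs at h with hc
    · rw [List.mem_singleton] at h
      subst h
      simp only at hc ⊢
      exact ⟨⟨b1, b2, b3, b4, hc.1⟩, ⟨b1, b2, by omega, hc.2.1, hc.2.2⟩, by omega⟩
    · simp at h
  · split_ifs at h with hc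
    · rw [List.mem_singleton] at h
      subst h
      simp only at hc ⊢
      exact ⟨⟨b1, b2, b3, b4, hc.1⟩, ⟨by omega, hc.2.1, b3, b4, hc.2.2⟩, by omega⟩
    · simp at h

theorem pvERel_allEdges (land : List (List Int)) (a b : Int × Int) :
    pvERel (pvAllEdges land) a b ↔ pvAdj land a b := by
  constructor
  · rintro ⟨e, he, h⟩
    have hadj := pvAllEdges_adj land e he
    rcases h with ⟨rfl, rfl⟩ | ⟨rfl, rfl⟩
    · exact hadj
    · exact pvAdj_symm land hadj
  · intro hadj
    obtain ⟨hga, hgb, hd⟩ := hadj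
    have hmem : ∀ (p : Int × Int) (e : (Int × Int) × (Int × Int)), pvGood land p →
        e ∈ pvCellEdges land p → e ∈ pvAllEdges land := by
      intro p e hg hep
      unfold pvAllEdges
      rw [List.mem_flatMap]
      exact ⟨p, (pv_mem_allCells _ _ p).mpr ⟨hg.1, hg.2.1, hg.2.2.1, hg.2.2.2.1⟩, hep⟩
    obtain ⟨a1, a2⟩ := a
    obtain ⟨b1, b2⟩ := b
    obtain ⟨g1, g2, g3, g4, g5⟩ := hga
    obtain ⟨k1, k2, k3, k4, k5⟩ := hgb
    simp only at hd g1 g2 g3 g4 g5 k1 k2 k3 k4 k5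
    have hcases : (b1 = a1 ∧ b2 = a2 + 1) ∨ (b1 = a1 ∧ a2 = b2 + 1)
        ∨ (b2 = a2 ∧ b1 = a1 + 1) ∨ (b2 = a2 ∧ a1 = b1 + 1) := by omega
    rcases hcases with ⟨rfl, rfl⟩ | ⟨rfl, he⟩ | ⟨rfl, rfl⟩ | ⟨rfl, he⟩
    · refine ⟨((b1, a2), (b1, a2 + 1)), hmem (b1, a2) _ ⟨g1, g2, g3, g4, g5⟩ ?_, Or.inl ⟨rfl, rfl⟩⟩
      unfold pvCellEdges
      rw [List.mem_append]
      left
      rw [if_pos (by exact ⟨g5, by omega, k5⟩)]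
      simp
    · refine ⟨((b1, b2), (b1, b2 + 1)), hmem (b1, b2) _ ⟨k1, k2, k3, k4, k5⟩ ?_,
        Or.inr ⟨by rw [he], rfl⟩⟩
      unfold pvCellEdges
      rw [List.mem_append]
      left
      rw [if_pos (by exact ⟨k5, by omega, by rw [← he]; exact g5⟩)]
      simp
    · refine ⟨((a1, b2), (a1 + 1, b2)), hmem (a1, b2) _ ⟨g1, g2, g3, g4, g5⟩ ?_, Or.inl ⟨rfl, rfl⟩⟩
      unfold pvCellEdges
      rw [List.mem_append]
      right
      rw [if_pos (by exact ⟨g5, by omega, k5⟩)]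
      simp
    · refine ⟨((b1, b2), (b1 + 1, b2)), hmem (b1, b2) _ ⟨k1, k2, k3, k4, k5⟩ ?_,
        Or.inr ⟨by rw [he], rfl⟩⟩
      unfold pvCellEdges
      rw [List.mem_append]
      right
      rw [if_pos (by exact ⟨k5, by omega, by rw [← he]; exact g5⟩)]
      simp

theorem pvLabelF_kernel (land : List (List Int)) :
    ∀ p q, pvInb land p → pvInb land q →
      (pvLab (pvLabelF land) (pvIdx land p) = pvLab (pvLabelF land) (pvIdx land q)
        ↔ pvConn land p q) := by
  have hlen0 : ((PySem.List.pyRange 0 (pvR land * pvC land) 1).length : Int)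
      = pvR land * pvC land := by
    rw [PySem.List.length_pyRange_one]
    have : 0 ≤ pvR land * pvC land := by
      unfold pvR pvC
      positivity
    omega
  have hker0 : ∀ p q, pvInb land p → pvInb land q →
      (pvLab (PySem.List.pyRange 0 (pvR land * pvC land) 1) (pvIdx land p)
        = pvLab (PySem.List.pyRange 0 (pvR land * pvC land) 1) (pvIdx land q)
        ↔ Relation.ReflTransGen (fun _ _ => False) p q) := by
    intro p q hp hq
    have hlab : ∀ r, pvInb land r →
        pvLab (PySem.List.pyRange 0 (pvR land * pvC land) 1) (pvIdx land r) = pvIdx land r := by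
      intro r hr
      have hb := pvIdx_bounds land r hr
      unfold pvLab
      rw [PySem.List.pyGetD_eq_getElem _ 0 hb.1 (by omega), PySem.List.getElem_pyRange_one]
      omega
    rw [hlab p hp, hlab q hq]
    constructor
    · intro h
      rw [pvIdx_inj land p q hp hq h]
    · intro h
      rcases Relation.ReflTransGen.cases_head h with rfl | ⟨c, hc, _⟩
      · rfl
      · exact absurd hc (by simp)
  obtain ⟨_, hker⟩ := pvMergeFold_kernel land (pvAllEdges land) (pvAllEdges_adj land)
    (PySem.List.pyRange 0 (pvR land * pvC land) 1) hlen0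
    (fun _ _ => False) (fun _ _ h => h.elim) hker0
  intro p q hp hq
  rw [show pvLabelF land = (pvAllEdges land).foldl
    (fun lab e => pvMerge lab (pvIdx land e.1) (pvIdx land e.2))
    (PySem.List.pyRange 0 (pvR land * pvC land) 1) from rfl]
  rw [hker p q hp hq]
  apply pvRTG_congr
  intro a b
  rw [false_or]
  exact pvERel_allEdges land a b

theorem pvFoldAddIf_mem (L : List Int) (P : Int → Prop) [DecidablePred P] (f : Int → Int)
    (s0 : PySem.Set Int) (x : Int) :
    x ∈ L.foldl (fun s r => if P r then PySem.Set.add s (f r) else s) s0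
      ↔ x ∈ s0 ∨ ∃ r ∈ L, P r ∧ f r = x := by
  induction L generalizing s0 with
  | nil => simp
  | cons r0 L' ih =>
      simp only [List.foldl_cons]
      by_cases h : P r0
      · rw [if_pos h, ih]
        rw [PySem.Set.mem_add]
        constructor
        · rintro ((hs | he) | ⟨r, hr, hP, hf⟩)
          · exact Or.inl hs
          · exact Or.inr ⟨r0, List.mem_cons_self, h, he.symm⟩
          · exact Or.inr ⟨r, List.mem_cons_of_mem _ hr, hP, hf⟩
        · rintro (hs | ⟨r, hr, hP, hf⟩)
          · exact Or.inl (Or.inl hs)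
          · rcases List.mem_cons.mp hr with rfl | hr'
            · exact Or.inl (Or.inr hf.symm)
            · exact Or.inr ⟨r, hr', hP, hf⟩
      · rw [if_neg h, ih]
        constructor
        · rintro (hs | ⟨r, hr, hP, hf⟩)
          · exact Or.inl hs
          · exact Or.inr ⟨r, List.mem_cons_of_mem _ hr, hP, hf⟩
        · rintro (hs | ⟨r, hr, hP, hf⟩)
          · exact Or.inl hs
          · rcases List.mem_cons.mp hr with rfl | hr'
            · exact absurd hP h
            · exact Or.inr ⟨r, hr', hP, hf⟩

theorem pvFoldCount (R C : Int) (t0 : Int) (Q : Int × Int → Prop) [DecidablePred Q] :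
    (PySem.List.pyRange 0 R 1).foldl (fun t r =>
        (PySem.List.pyRange 0 C 1).foldl (fun t cc => if Q (r, cc) then t + 1 else t) t) t0
      = t0 + ((pvAllCells R C).countP (fun p => decide (Q p)) : Int) := by
  have h1 : (PySem.List.pyRange 0 R 1).foldl (fun t r =>
        (PySem.List.pyRange 0 C 1).foldl (fun t cc => if Q (r, cc) then t + 1 else t) t) t0
      = (pvAllCells R C).foldl (fun t p => if Q p then t + 1 else t) t0 := by
    rw [pvAllCells, List.foldl_flatMap]
    simp only [List.foldl_map]
  rw [h1]
  have h2 : (pvAllCells R C).foldl (fun t p => if Q p then t + 1 else t) t0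
      = (pvAllCells R C).foldl (fun t p => if (fun p => decide (Q p)) p = true then t + 1 else t) t0 := by
    simp only [decide_eq_true_eq]
  rw [h2, PySem.List.foldl_count_if]

theorem pvAltLabel_eq (land : List (List Int)) : pvAltLabel land = pvLabelF land := by
  unfold pvAltLabel
  conv_rhs => rw [pvLabelF, pvAllEdges, List.foldl_flatMap, pvAllCells, List.foldl_flatMap]
  simp only [List.foldl_map, PySem.List.len_eq]
  show _ = (PySem.List.pyRange 0 (pvR land) 1).foldl _ (PySem.List.pyRange 0 (pvR land * pvC land) 1)
  unfold pvR pvC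
  congr 1
  funext lab r
  congr 1
  funext lab c
  show _ = (pvCellEdges land (r, c)).foldl
    (fun lab e => pvMerge lab (pvIdx land e.1) (pvIdx land e.2)) lab
  unfold pvCellEdges pvIdx pvR pvC
  dsimp only
  rw [List.foldl_append]
  split_ifs <;>
    first
      | tauto
      | (simp only [List.foldl_cons, List.foldl_nil]; ring_nf)

theorem pvAltColCnt_eq (land : List (List Int)) :
    pvAltColCnt land (pvLabelF land)
      = (PySem.List.pyRange 0 (pvC land) 1).map (fun c => (pvCnt land c : Int)) := by
  have hkernel := pvLabelF_kernel land
  unfold pvAltColCnt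
  simp only [PySem.List.len_eq]
  rw [PySem.List.foldl_append_singleton_eq_map, List.nil_append]
  show _ = (PySem.List.pyRange 0 (pvC land) 1).map _
  apply List.map_congr_left
  intro c hc
  rw [PySem.List.mem_pyRange_one] at hc
  have h := pvFoldCount ((land.length : Int)) (((PySem.List.pyGetD land 0 []).length : Int)) 0
    (fun p => pvLandAt land p.1 p.2 ≠ 0 ∧
      PySem.List.pyGetD (pvLabelF land) (p.1 * ((PySem.List.pyGetD land 0 []).length : Int) + p.2) 0
        ∈ (PySem.List.pyRange 0 ((land.length : Int)) 1).foldl (fun s r =>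
            if pvLandAt land r c ≠ 0 then
              PySem.Set.add s (PySem.List.pyGetD (pvLabelF land)
                (r * ((PySem.List.pyGetD land 0 []).length : Int) + c) 0)
            else s) PySem.Set.empty)
  dsimp only at h
  rw [h, zero_add]
  have hcount : (pvAllCells ((land.length : Int)) (((PySem.List.pyGetD land 0 []).length : Int))).countP
        (fun p => decide (pvLandAt land p.1 p.2 ≠ 0 ∧
          PySem.List.pyGetD (pvLabelF land) (p.1 * ((PySem.List.pyGetD land 0 []).length : Int) + p.2) 0
            ∈ (PySem.List.pyRange 0 ((land.length : Int)) 1).foldl (fun s r =>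
                if pvLandAt land r c ≠ 0 then
                  PySem.Set.add s (PySem.List.pyGetD (pvLabelF land)
                    (r * ((PySem.List.pyGetD land 0 []).length : Int) + c) 0)
                else s) PySem.Set.empty))
      = pvCnt land c := by
    show (pvAllCells (pvR land) (pvC land)).countP _ = _
    unfold pvCnt
    apply List.countP_congr
    intro p hp
    have hinb : pvInb land p := by
      rw [pv_mem_allCells] at hp
      exact ⟨hp.1, hp.2.1, hp.2.2.1, hp.2.2.2⟩
    simp only [decide_eq_true_eq]
    have hmemCol : ∀ x : Int,
        (x ∈ (PySem.List.pyRange 0 ((land.length : Int)) 1).foldl (fun s r =>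
            if pvLandAt land r c ≠ 0 then
              PySem.Set.add s (PySem.List.pyGetD (pvLabelF land)
                (r * ((PySem.List.pyGetD land 0 []).length : Int) + c) 0)
            else s) PySem.Set.empty)
          ↔ ∃ r ∈ PySem.List.pyRange 0 ((land.length : Int)) 1, pvLandAt land r c ≠ 0 ∧
              PySem.List.pyGetD (pvLabelF land)
                (r * ((PySem.List.pyGetD land 0 []).length : Int) + c) 0 = x := by
      intro x
      rw [pvFoldAddIf_mem]
      simp
    constructor
    · rintro ⟨hfill, hmem⟩
      have hgood : pvGood land p := ⟨hinb.1, hinb.2.1, hinb.2.2.1, hinb.2.2.2, hfill⟩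
      refine ⟨hgood, ?_⟩
      obtain ⟨r, hr, hfr, hlabeq⟩ := (hmemCol _).mp hmem
      rw [PySem.List.mem_pyRange_one] at hr
      have hrcinb : pvInb land (r, c) := ⟨hr.1, hr.2, hc.1, hc.2⟩
      have := (hkernel (r, c) p hrcinb hinb).mp (by exact hlabeq)
      exact ⟨(r, c), pvConn_symm land this, rfl⟩
    · rintro ⟨hgood, n, hconn, hn2⟩
      refine ⟨hgood.2.2.2.2, ?_⟩
      have hngood : pvGood land n := pvConn_good land p n hconn hgood
      apply (hmemCol _).mpr
      refine ⟨n.1, ?_, ?_, ?_⟩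
      · rw [PySem.List.mem_pyRange_one]
        exact ⟨hngood.1, hngood.2.1⟩
      · rw [← hn2]
        exact hngood.2.2.2.2
      · have hk := (hkernel n p ⟨hngood.1, hngood.2.1, hngood.2.2.1, hngood.2.2.2.1⟩ hinb).mpr
          (pvConn_symm land hconn)
        rw [← hn2]
        exact hk
  rw [hcount]

theorem solution_alt_eq_spec (land : List (List Int)) :
    solution_alt land = (PySem.List.max? (pvSpecList land) (fun v => v)).getD 0 := by
  show (PySem.List.max? (pvAltColCnt land (pvAltLabel land)) (fun v => v)).getD 0 = _
  rw [pvAltLabel_eq, pvAltColCnt_eq]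
  rfl

-- ===== VERDICT (by name: the statement is the Claim_ definition above) =====
theorem solution_spec : Claim_equal_solution := by
  intro land _hdom _hpre
  unfold Spec_solution
  rw [solution_eq_spec land, solution_alt_eq_spec land]
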